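-- pv_equiv track=rewrite | github.com/thanhan92-f1/CLARA-Care | services/ml/src/clara_ml/agents/council_intake.py | _build_intake_citations
-- ===== SOURCE A (Python) =====
-- from typing import Any
--
-- def _as_text(value: Any) -> str:
--     if isinstance(value, str):
--         return value.strip()
--     if isinstance(value, (int, float)) and not isinstance(value, bool):
--         return str(value)
--     return ""
--
-- def _build_intake_citations(
--     symptoms: list[str],
--     labs: list[dict[str, str]],
--     medications: list[str],
--     history: list[str],
-- ) -> list[dict[str, Any]]:
--     citations: list[dict[str, Any]] = []
--     for index, symptom in enumerate(symptoms[:6], start=1):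
--         citations.append(
--             {
--                 "source_id": f"intake-symptom-{index}",
--                 "source": "transcript_extraction",
--                 "title": f"Symptom extract {index}",
--                 "url": None,
--                 "relevance": "Symptom text captured from intake transcript.",
--                 "snippet": symptom,
--                 "section": "symptoms",
--                 "evidence_type": "extracted_text",
--             }
--         )
--     for index, lab in enumerate(labs[:6], start=1):
--         raw = _as_text(lab.get("raw")) or f"{_as_text(lab.get('name'))}={_as_text(lab.get('value'))}"
--         citations.append(
--             {
--                 "source_id": f"intake-lab-{index}",
--                 "source": "transcript_extraction",
--                 "title": f"Lab extract {index}",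
--                 "url": None,
--                 "relevance": "Numeric marker extracted for downstream council scoring.",
--                 "snippet": raw,
--                 "section": "labs",
--                 "evidence_type": "numeric_extract",
--             }
--         )
--     for index, medication in enumerate(medications[:4], start=1):
--         citations.append(
--             {
--                 "source_id": f"intake-med-{index}",
--                 "source": "transcript_extraction",
--                 "title": f"Medication extract {index}",
--                 "url": None,
--                 "relevance": "Medication exposure extracted from transcript.",
--                 "snippet": medication,
--                 "section": "medications",
--                 "evidence_type": "medication_extract",
--             }
--         )
--     for index, item in enumerate(history[:4], start=1):
--         citations.append(
--             {
--                 "source_id": f"intake-history-{index}",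
--                 "source": "transcript_extraction",
--                 "title": f"History extract {index}",
--                 "url": None,
--                 "relevance": "History context extracted from transcript.",
--                 "snippet": item,
--                 "section": "history",
--                 "evidence_type": "history_extract",
--             }
--         )
--     return citations
-- ===== SOURCE B (Python) =====
-- from typing import Any
--
-- def _as_text(value: Any) -> str:
--     if isinstance(value, str):
--         return value.strip()
--     if isinstance(value, (int, float)) and not isinstance(value, bool):
--         return str(value)
--     return ""
--
-- def _build_intake_citations(
--     symptoms: list[str],
--     labs: list[dict[str, str]],
--     medications: list[str],
--     history: list[str],
-- ) -> list[dict[str, Any]]: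
--     # Recursive emitter: counts the cap down while consuming the list, consing each
--     # citation in front of the already-built rest; no slicing, no enumerate, no append loop.
--     def cites(items, cap, index, mk, rest):
--         if cap == 0 or not items:
--             return rest
--         return [mk(index, items[0])] + cites(items[1:], cap - 1, index + 1, mk, rest)
--
--     def make(pid, word, rel, sec, et):
--         def mk(i, snippet):
--             return {
--                 "source_id": f"intake-{pid}-{i}",
--                 "source": "transcript_extraction",
--                 "title": f"{word} extract {i}",
--                 "url": None,
--                 "relevance": rel,
--                 "snippet": snippet,
--                 "section": sec,
--                 "evidence_type": et,
--             }
--         return mk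
--
--     mk_sym = make("symptom", "Symptom", "Symptom text captured from intake transcript.",
--                   "symptoms", "extracted_text")
--     mk_lab_text = make("lab", "Lab", "Numeric marker extracted for downstream council scoring.",
--                        "labs", "numeric_extract")
--
--     def mk_lab(i, lab):
--         return mk_lab_text(i, _as_text(lab.get("raw"))
--                            or f"{_as_text(lab.get('name'))}={_as_text(lab.get('value'))}")
--
--     mk_med = make("med", "Medication", "Medication exposure extracted from transcript.",
--                   "medications", "medication_extract")
--     mk_hist = make("history", "History", "History context extracted from transcript.",
--                    "history", "history_extract")
--
--     # Built back-to-front: the history citations form the innermost rest.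
--     return cites(symptoms, 6, 1, mk_sym,
--            cites(labs, 6, 1, mk_lab,
--            cites(medications, 4, 1, mk_med,
--            cites(history, 4, 1, mk_hist, []))))
-- ===== Notes on version B (the rewrite author's own statement) =====
-- stated objective: alternative
-- what changed: Replaces A's four copy-pasted slice+enumerate append loops with one generic recursive emitter that counts a cap down while consuming its list and conses each citation onto the already-built rest, the four sections nested back-to-front as each other's rest.
import Mathlib
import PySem

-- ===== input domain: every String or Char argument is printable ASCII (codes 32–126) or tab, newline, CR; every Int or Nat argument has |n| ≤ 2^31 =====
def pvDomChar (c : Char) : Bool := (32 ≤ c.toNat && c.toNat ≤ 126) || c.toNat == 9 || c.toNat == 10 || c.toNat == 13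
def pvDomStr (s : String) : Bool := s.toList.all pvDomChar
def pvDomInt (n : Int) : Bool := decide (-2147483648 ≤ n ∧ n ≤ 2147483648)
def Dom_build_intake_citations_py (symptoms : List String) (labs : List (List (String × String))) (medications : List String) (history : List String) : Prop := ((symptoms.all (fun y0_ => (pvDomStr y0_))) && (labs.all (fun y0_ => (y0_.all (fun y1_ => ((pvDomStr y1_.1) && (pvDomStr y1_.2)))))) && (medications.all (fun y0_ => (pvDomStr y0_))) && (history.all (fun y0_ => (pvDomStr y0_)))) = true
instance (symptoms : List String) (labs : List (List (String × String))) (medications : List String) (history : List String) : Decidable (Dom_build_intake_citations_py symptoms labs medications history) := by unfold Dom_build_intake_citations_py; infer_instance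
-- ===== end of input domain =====

-- B replaces A's four slice+enumerate append loops with one generic recursive emitter
-- (cap countdown, citations consed onto the already-built rest, sections nested
-- back-to-front); objective: alternative decomposition, same cost.

-- ===== PORT A =====
-- _as_text(lab.get(k)): on dict[str,str] the value is a str (stripped) or None ("")
def pvAsText (v : Option String) : String :=
  match v with
  | some s => PySem.Str.strip s
  | none => ""

def build_intake_citations_py (symptoms : List String) (labs : List (List (String × String))) (medications : List String) (history : List String) : List (List (String × Option String)) :=
  let citations : List (List (String × Option String)) := []
  let citations := (PySem.List.enumerate (PySem.List.slice symptoms none (some 6)) 1).foldl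
    (fun cs p => cs ++ [[
      ("source_id", some ("intake-symptom-" ++ PySem.Int.toStr p.1)),
      ("source", some "transcript_extraction"),
      ("title", some ("Symptom extract " ++ PySem.Int.toStr p.1)),
      ("url", none),
      ("relevance", some "Symptom text captured from intake transcript."),
      ("snippet", some p.2),
      ("section", some "symptoms"),
      ("evidence_type", some "extracted_text")]]) citations
  let citations := (PySem.List.enumerate (PySem.List.slice labs none (some 6)) 1).foldl
    (fun cs p =>
      let raw0 := pvAsText ((PySem.Dict.mk p.2).get? "raw")
      let raw := if raw0 == "" then
          pvAsText ((PySem.Dict.mk p.2).get? "name") ++ "=" ++ pvAsText ((PySem.Dict.mk p.2).get? "value")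
        else raw0
      cs ++ [[
      ("source_id", some ("intake-lab-" ++ PySem.Int.toStr p.1)),
      ("source", some "transcript_extraction"),
      ("title", some ("Lab extract " ++ PySem.Int.toStr p.1)),
      ("url", none),
      ("relevance", some "Numeric marker extracted for downstream council scoring."),
      ("snippet", some raw),
      ("section", some "labs"),
      ("evidence_type", some "numeric_extract")]]) citations
  let citations := (PySem.List.enumerate (PySem.List.slice medications none (some 4)) 1).foldl
    (fun cs p => cs ++ [[
      ("source_id", some ("intake-med-" ++ PySem.Int.toStr p.1)),
      ("source", some "transcript_extraction"),
      ("title", some ("Medication extract " ++ PySem.Int.toStr p.1)),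
      ("url", none),
      ("relevance", some "Medication exposure extracted from transcript."),
      ("snippet", some p.2),
      ("section", some "medications"),
      ("evidence_type", some "medication_extract")]]) citations
  let citations := (PySem.List.enumerate (PySem.List.slice history none (some 4)) 1).foldl
    (fun cs p => cs ++ [[
      ("source_id", some ("intake-history-" ++ PySem.Int.toStr p.1)),
      ("source", some "transcript_extraction"),
      ("title", some ("History extract " ++ PySem.Int.toStr p.1)),
      ("url", none),
      ("relevance", some "History context extracted from transcript."),
      ("snippet", some p.2),
      ("section", some "history"),
      ("evidence_type", some "history_extract")]]) citations
  citations

-- ===== PORT B =====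
-- generic recursive emitter: cap countdown while consuming the list, output consed onto rest
def pvCites {α : Type} (mk : Int → α → List (String × Option String)) :
    List α → Int → Int → List (List (String × Option String)) → List (List (String × Option String))
  | items, cap, index, rest =>
    if cap == 0 then rest
    else match items with
      | [] => rest
      | x :: tl => mk index x :: pvCites mk tl (cap - 1) (index + 1) rest

-- the `make` closure factory of Source B
def pvMake (pid word rel sec et : String) (i : Int) (snippet : String) : List (String × Option String) :=
  [("source_id", some ("intake-" ++ pid ++ "-" ++ PySem.Int.toStr i)),
   ("source", some "transcript_extraction"),
   ("title", some (word ++ " extract " ++ PySem.Int.toStr i)),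
   ("url", none),
   ("relevance", some rel),
   ("snippet", some snippet),
   ("section", some sec),
   ("evidence_type", some et)]

def pvMkLab (i : Int) (lab : List (String × String)) : List (String × Option String) :=
  let raw0 := pvAsText ((PySem.Dict.mk lab).get? "raw")
  pvMake "lab" "Lab" "Numeric marker extracted for downstream council scoring." "labs" "numeric_extract" i
    (if raw0 == "" then
        pvAsText ((PySem.Dict.mk lab).get? "name") ++ "=" ++ pvAsText ((PySem.Dict.mk lab).get? "value")
      else raw0)

def build_intake_citations_py_alt (symptoms : List String) (labs : List (List (String × String))) (medications : List String) (history : List String) : List (List (String × Option String)) :=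
  pvCites (pvMake "symptom" "Symptom" "Symptom text captured from intake transcript." "symptoms" "extracted_text") symptoms 6 1
    (pvCites pvMkLab labs 6 1
      (pvCites (pvMake "med" "Medication" "Medication exposure extracted from transcript." "medications" "medication_extract") medications 4 1
        (pvCites (pvMake "history" "History" "History context extracted from transcript." "history" "history_extract") history 4 1 [])))

-- ===== PRECONDITION & SPEC =====
def Spec_build_intake_citations_py (symptoms : List String) (labs : List (List (String × String))) (medications : List String) (history : List String) (out : List (List (String × Option String))) : Prop := out = build_intake_citations_py_alt symptoms labs medications history
instance (symptoms : List String) (labs : List (List (String × String))) (medications : List String) (history : List String) (out : List (List (String × Option String))) : Decidable (Spec_build_intake_citations_py symptoms labs medications history out) := by unfold Spec_build_intake_citations_py; infer_instance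

-- ===== CLAIM (what is proved, stated in full; the proofs are below) =====
def Claim_equal_build_intake_citations_py : Prop := ∀ (symptoms : List String) (labs : List (List (String × String))) (medications : List String) (history : List String), Dom_build_intake_citations_py symptoms labs medications history → Spec_build_intake_citations_py symptoms labs medications history (build_intake_citations_py symptoms labs medications history)

-- ===== LEMMAS AND PROOFS =====
lemma pvCites_eq {α : Type} (mk : Int → α → List (String × Option String)) (xs : List α)
    (cap : Int) (hcap : 0 ≤ cap) (i : Int) (rest : List (List (String × Option String))) :
    pvCites mk xs cap i rest
      = ((PySem.List.enumerate (xs.take cap.toNat) i).map (fun p => mk p.1 p.2)) ++ rest := by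
  induction xs generalizing cap i with
  | nil => simp [pvCites, PySem.List.enumerate_nil]
  | cons x tl ih =>
    by_cases h : cap = 0
    · subst h; simp [pvCites, PySem.List.enumerate_nil]
    · have h1 : cap.toNat = (cap - 1).toNat + 1 := by omega
      rw [pvCites]
      simp only [beq_iff_eq, if_neg h, h1, List.take_succ_cons, PySem.List.enumerate_cons,
        List.map_cons, List.cons_append, ih (cap - 1) (by omega) (i + 1)]

-- ===== VERDICT (by name: the statement is the Claim_ definition above) =====
theorem build_intake_citations_py_spec : Claim_equal_build_intake_citations_py := by
  intro symptoms labs medications history _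
  unfold Spec_build_intake_citations_py build_intake_citations_py build_intake_citations_py_alt
  rw [pvCites_eq _ _ 6 (by omega), pvCites_eq _ _ 6 (by omega),
      pvCites_eq _ _ 4 (by omega), pvCites_eq _ _ 4 (by omega)]
  simp only [PySem.List.foldl_append_singleton_eq_map, List.nil_append, List.append_assoc]
  norm_num [pvMake, pvMkLab, PySem.List.slice_to]
  simp only [String.reduceAppend]
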